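-- pv_equiv track=rewrite | github.com/rheard/ProjectEuler | p056.py | solve
-- ===== SOURCE A (Python) =====
-- def solve(n=100):
--     def digit_sum(n):
--         return sum(int(x) for x in str(n))
--
--     current_max = digit_sum((n - 1) ** (n - 1))
--
--     for i in reversed(range(n)):
--         # i as both
--         iter_max = digit_sum(i ** i)
--
--         # i as exponent for later numbers
--         for j in reversed(range(i + 1, n)):
--             this_digit_sum = digit_sum(j ** i)
--
--             if this_digit_sum > iter_max:
--                 iter_max = this_digit_sum
--
--         # i as base for later numbers
--         for j in reversed(range(i + 1, n)):
--             this_digit_sum = digit_sum(i ** j)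
--
--             if this_digit_sum > iter_max:
--                 iter_max = this_digit_sum
--
--         if iter_max > current_max:
--             current_max = iter_max
--
--     return current_max
-- ===== SOURCE B (Python) =====
-- def solve(n=100):
--     def digit_sum(n):
--         return sum(int(x) for x in str(n))
--
--     return max(digit_sum(a ** b) for a in range(n) for b in range(n))
-- ===== Notes on version B (the rewrite author's own statement) =====
-- stated objective: simpler
-- what changed: Replaces A's seed-plus-diagonal-plus-two-reversed-triangles decomposition and manual running-max updates with a single flat max() over the whole n by n grid of pairs.
-- outside the precondition, e.g. on solve(0): A raises ValueError, B raises ValueError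
import Mathlib
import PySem

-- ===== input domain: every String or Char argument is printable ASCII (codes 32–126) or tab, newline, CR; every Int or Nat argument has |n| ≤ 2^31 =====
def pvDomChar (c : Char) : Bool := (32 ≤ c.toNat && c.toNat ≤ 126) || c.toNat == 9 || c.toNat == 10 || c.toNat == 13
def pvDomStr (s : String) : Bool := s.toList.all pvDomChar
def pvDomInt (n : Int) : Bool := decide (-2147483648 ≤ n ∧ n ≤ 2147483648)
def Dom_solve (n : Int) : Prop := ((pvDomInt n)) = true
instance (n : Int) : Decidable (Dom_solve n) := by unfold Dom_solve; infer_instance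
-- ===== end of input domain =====

-- B replaces A's seed + diagonal + two reversed-triangle passes by one flat max() over the whole n×n grid (objective: simpler).

-- ===== PORT A =====
-- digit_sum(n) = sum(int(x) for x in str(n)); int(x) via PySem.Int.ofChars? (the .getD 0 default is
-- never reached under Pre_solve: every argument is a nonnegative integer, so str(n) is all digits)
def digitSum (m : Int) : Int :=
  ((PySem.Int.toChars m).map (fun c => (PySem.Int.ofChars? [c]).getD 0)).sum

-- a ** b; exact for b ≥ 0, which holds for every exponent reached under Pre_solve
def pyPow (a b : Int) : Int := a ^ b.toNat

def solve (n : Int) : Int :=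
  ((PySem.List.pyRange 0 n 1).reverse).foldl
    (fun currentMax i =>
      let iterMax0 := digitSum (pyPow i i)
      let iterMax1 := ((PySem.List.pyRange (i+1) n 1).reverse).foldl
        (fun m j => let d := digitSum (pyPow j i); if d > m then d else m) iterMax0
      let iterMax2 := ((PySem.List.pyRange (i+1) n 1).reverse).foldl
        (fun m j => let d := digitSum (pyPow i j); if d > m then d else m) iterMax1
      if iterMax2 > currentMax then iterMax2 else currentMax)
    (digitSum (pyPow (n-1) (n-1)))

-- ===== PORT B =====
def solve_alt (n : Int) : Int :=
  (PySem.List.max?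
    ((PySem.List.pyRange 0 n 1).flatMap (fun a =>
      (PySem.List.pyRange 0 n 1).map (fun b => digitSum (pyPow a b))))
    (fun y => y)).getD 0

-- ===== PRECONDITION & SPEC =====
-- Pre_ excludes n ≤ 0, where both Pythons raise ValueError (A via int('-') on a float power, B via max() of an empty sequence).
def Pre_solve (n : Int) : Prop := 1 ≤ n
instance (n : Int) : Decidable (Pre_solve n) := by unfold Pre_solve; infer_instance
def pvWitness_solve : Int := 5

def Spec_solve (n : Int) (out : Int) : Prop := out = solve_alt n
instance (n : Int) (out : Int) : Decidable (Spec_solve n out) := by unfold Spec_solve; infer_instance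

-- ===== CLAIM (what is proved, stated in full; the proofs are below) =====
def Claim_equal_solve : Prop := ∀ (n : Int), Dom_solve n → Pre_solve n → Spec_solve n (solve n)

-- ===== LEMMAS AND PROOFS =====

-- abbreviation used only by the proofs
def pvF (a b : Int) : Int := digitSum (pyPow a b)

-- A's flat list of candidate values (all pairs, grouped by min of the pair, in A's traversal order)
def pvQ (n : Int) : List Int :=
  ((PySem.List.pyRange 0 n 1).reverse).flatMap (fun i =>
    pvF i i ::
      (((PySem.List.pyRange (i+1) n 1).reverse).map (fun j => pvF j i) ++
       ((PySem.List.pyRange (i+1) n 1).reverse).map (fun j => pvF i j)))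

-- B's flat list of candidate values (lexicographic grid)
def pvP (n : Int) : List Int :=
  (PySem.List.pyRange 0 n 1).flatMap (fun a =>
    (PySem.List.pyRange 0 n 1).map (fun b => pvF a b))

lemma pv_if_max (m x : Int) : (if x > m then x else m) = max m x := by
  rw [max_def]; split_ifs <;> omega

lemma pv_foldl_fun_congr (l : List Int) (f g : Int → Int → Int) (a : Int)
    (h : ∀ x y, f x y = g x y) : l.foldl f a = l.foldl g a := by
  have : f = g := funext fun x => funext fun y => h x y
  rw [this]

lemma pv_foldl_step (g : Int → Int) (l : List Int) (a : Int) :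
    l.foldl (fun m j => if g j > m then g j else m) a = (l.map g).foldl max a := by
  induction l generalizing a with
  | nil => rfl
  | cons x t ih =>
    simp only [List.foldl_cons, List.map_cons]
    rw [pv_if_max, ih]

lemma pv_foldl_max_max (l : List Int) (a b : Int) :
    l.foldl max (max a b) = max a (l.foldl max b) := by
  induction l generalizing b with
  | nil => rfl
  | cons x t ih => simpa [max_assoc] using ih (max b x)

lemma pv_foldl_group (l : List Int) (s : Int → Int) (g : Int → List Int) (a : Int) :
    (l.map (fun i => (g i).foldl max (s i))).foldl max a =
    (l.flatMap (fun i => s i :: g i)).foldl max a := by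
  induction l generalizing a with
  | nil => rfl
  | cons i t ih =>
    simp only [List.map_cons, List.flatMap_cons, List.foldl_cons, List.cons_append,
      List.foldl_append]
    rw [← ih, pv_foldl_max_max (g i) a (s i)]

lemma pv_solve_eq_fold (n : Int) :
    solve n = (pvQ n).foldl max (pvF (n-1) (n-1)) := by
  unfold solve pvQ
  rw [← pv_foldl_group ((PySem.List.pyRange 0 n 1).reverse)
        (fun i => pvF i i)
        (fun i => ((PySem.List.pyRange (i+1) n 1).reverse).map (fun j => pvF j i) ++
                  ((PySem.List.pyRange (i+1) n 1).reverse).map (fun j => pvF i j)),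
      List.foldl_map]
  refine pv_foldl_fun_congr _ _ _ _ (fun cm i => ?_)
  dsimp only []
  rw [pv_foldl_step (fun j => digitSum (pyPow j i)),
      pv_foldl_step (fun j => digitSum (pyPow i j)),
      pv_if_max, List.foldl_append]
  rfl

lemma pv_foldl_max_mem (l : List Int) (a : Int) : l.foldl max a ∈ a :: l := by
  induction l generalizing a with
  | nil => simp
  | cons x t ih =>
    have h := ih (max a x)
    simp only [List.foldl_cons]
    rcases List.mem_cons.1 h with h1 | h1
    · rcases max_choice a x with hc | hc
      · exact List.mem_cons.2 (Or.inl (h1.trans hc))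
      · exact List.mem_cons.2 (Or.inr (List.mem_cons.2 (Or.inl (h1.trans hc))))
    · exact List.mem_cons.2 (Or.inr (List.mem_cons.2 (Or.inr h1)))

lemma pv_mem_P (n x : Int) :
    x ∈ pvP n ↔ ∃ a b : Int, 0 ≤ a ∧ a < n ∧ 0 ≤ b ∧ b < n ∧ x = pvF a b := by
  unfold pvP
  simp only [List.mem_flatMap, List.mem_map, PySem.List.mem_pyRange_one]
  constructor
  · rintro ⟨a, ⟨ha0, han⟩, b, ⟨hb0, hbn⟩, rfl⟩
    exact ⟨a, b, ha0, han, hb0, hbn, rfl⟩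
  · rintro ⟨a, b, ha0, han, hb0, hbn, rfl⟩
    exact ⟨a, ⟨ha0, han⟩, b, ⟨hb0, hbn⟩, rfl⟩

lemma pv_mem_Q (n x : Int) :
    x ∈ pvQ n ↔ ∃ i : Int, 0 ≤ i ∧ i < n ∧
      (x = pvF i i ∨ ∃ j : Int, i < j ∧ j < n ∧ (x = pvF j i ∨ x = pvF i j)) := by
  unfold pvQ
  simp only [List.mem_flatMap, List.mem_reverse, List.mem_cons, List.mem_append,
    List.mem_map, PySem.List.mem_pyRange_one]
  constructor
  · rintro ⟨i, ⟨hi0, hin⟩, h⟩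
    refine ⟨i, hi0, hin, ?_⟩
    rcases h with h | ⟨j, ⟨hj1, hj2⟩, rfl⟩ | ⟨j, ⟨hj1, hj2⟩, rfl⟩
    · exact Or.inl h
    · exact Or.inr ⟨j, by omega, hj2, Or.inl rfl⟩
    · exact Or.inr ⟨j, by omega, hj2, Or.inr rfl⟩
  · rintro ⟨i, hi0, hin, h⟩
    refine ⟨i, ⟨hi0, hin⟩, ?_⟩
    rcases h with h | ⟨j, hj1, hj2, h | h⟩
    · exact Or.inl h
    · exact Or.inr (Or.inl ⟨j, ⟨by omega, hj2⟩, h.symm⟩)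
    · exact Or.inr (Or.inr ⟨j, ⟨by omega, hj2⟩, h.symm⟩)

lemma pv_Q_subset_P (n : Int) (x : Int) (hx : x ∈ pvQ n) : x ∈ pvP n := by
  rw [pv_mem_Q] at hx
  rw [pv_mem_P]
  obtain ⟨i, hi0, hin, h⟩ := hx
  rcases h with h | ⟨j, hj1, hj2, h | h⟩
  · exact ⟨i, i, hi0, hin, hi0, hin, h⟩
  · exact ⟨j, i, by omega, hj2, hi0, hin, h⟩
  · exact ⟨i, j, hi0, hin, by omega, hj2, h⟩

lemma pv_P_subset_Q (n : Int) (x : Int) (hx : x ∈ pvP n) : x ∈ pvQ n := by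
  rw [pv_mem_P] at hx
  rw [pv_mem_Q]
  obtain ⟨a, b, ha0, han, hb0, hbn, rfl⟩ := hx
  rcases lt_trichotomy a b with h | h | h
  · exact ⟨a, ha0, han, Or.inr ⟨b, h, hbn, Or.inr rfl⟩⟩
  · exact ⟨a, ha0, han, Or.inl (by rw [h])⟩
  · exact ⟨b, hb0, hbn, Or.inr ⟨a, h, han, Or.inl rfl⟩⟩

-- ===== VERDICT (by name: the statement is the Claim_ definition above) =====
theorem solve_spec : Claim_equal_solve := by
  intro n _ hn
  have hn1 : (1 : Int) ≤ n := hn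
  unfold Spec_solve
  have hPne : pvP n ≠ [] := by
    intro h
    have : pvF 0 0 ∈ pvP n := (pv_mem_P n _).2 ⟨0, 0, le_refl 0, hn, le_refl 0, hn, rfl⟩
    rw [h] at this
    exact absurd this (List.not_mem_nil)
  obtain ⟨v, hv⟩ : ∃ v, PySem.List.max? (pvP n) (fun y => y) = some v := by
    rcases h : PySem.List.max? (pvP n) (fun y => y) with _ | v
    · exact absurd ((PySem.List.max?_eq_none_iff _ _).1 h) hPne
    · exact ⟨v, rfl⟩
  have hBv : solve_alt n = v := by
    unfold solve_alt
    have : pvP n = (PySem.List.pyRange 0 n 1).flatMap (fun a =>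
        (PySem.List.pyRange 0 n 1).map (fun b => digitSum (pyPow a b))) := by
      unfold pvP pvF; rfl
    rw [← this, hv]; rfl
  rw [pv_solve_eq_fold, hBv]
  have hAmem : (pvQ n).foldl max (pvF (n-1) (n-1)) ∈ pvF (n-1) (n-1) :: pvQ n :=
    pv_foldl_max_mem _ _
  apply le_antisymm
  · -- A's value is an element of P, hence ≤ v
    have hin : (pvQ n).foldl max (pvF (n-1) (n-1)) ∈ pvP n := by
      rcases List.mem_cons.1 hAmem with h | h
      · rw [h]
        exact (pv_mem_P n _).2 ⟨n-1, n-1, by omega, by omega, by omega, by omega, rfl⟩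
      · exact pv_Q_subset_P n _ h
    exact PySem.List.max?_isMax hv _ hin
  · -- v is an element of Q, hence ≤ A's fold
    have hvQ : v ∈ pvQ n := pv_P_subset_Q n v (PySem.List.max?_mem hv)
    exact (PySem.List.le_foldl_max (pvQ n) (pvF (n-1) (n-1))).2 v hvQ
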